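-- pv_equiv track=rewrite | github.com/ProteinEngineering-PESB2/assembly_ppi_models | encooders/physicochemical_properties_encoding_aaindex.py | encoding_sequence
-- ===== SOURCE A (Python) =====
-- def encoding_sequence(sequence, dict_encoder, value_encoding):
--
--     array_response = []
--     sequence = sequence.upper()
--     for residue in sequence:
--         try:
--             value_encode = value_encoding[dict_encoder[residue]]
--             array_response.append(value_encode)
--         except:
--             pass
--     return array_response
-- ===== SOURCE B (Python) =====
-- def encoding_sequence(sequence, dict_encoder, value_encoding):
--     seq = sequence.upper()
--     positions = {}
--     for i, ch in enumerate(seq):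
--         positions.setdefault(ch, []).append(i)
--     slots = [None] * len(seq)
--     for residue, code in dict_encoder.items():
--         if residue in positions and code in value_encoding:
--             value = value_encoding[code]
--             for i in positions[residue]:
--                 slots[i] = value
--     return [v for v in slots if v is not None]
-- ===== Notes on version B (the rewrite author's own statement) =====
-- stated objective: alternative
-- what changed: B inverts the traversal: it indexes the uppercased sequence once into a character->positions table, then iterates over the dict entries (not the sequence) writing each resolved value into a position-indexed slot array, and finally compacts the non-empty slots; A instead walks the sequence doing a per-character double dict lookup under try/except. Pre_ only excludes association lists with duplicate dict_encoder keys, which no Python dict can represent.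
import Mathlib
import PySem

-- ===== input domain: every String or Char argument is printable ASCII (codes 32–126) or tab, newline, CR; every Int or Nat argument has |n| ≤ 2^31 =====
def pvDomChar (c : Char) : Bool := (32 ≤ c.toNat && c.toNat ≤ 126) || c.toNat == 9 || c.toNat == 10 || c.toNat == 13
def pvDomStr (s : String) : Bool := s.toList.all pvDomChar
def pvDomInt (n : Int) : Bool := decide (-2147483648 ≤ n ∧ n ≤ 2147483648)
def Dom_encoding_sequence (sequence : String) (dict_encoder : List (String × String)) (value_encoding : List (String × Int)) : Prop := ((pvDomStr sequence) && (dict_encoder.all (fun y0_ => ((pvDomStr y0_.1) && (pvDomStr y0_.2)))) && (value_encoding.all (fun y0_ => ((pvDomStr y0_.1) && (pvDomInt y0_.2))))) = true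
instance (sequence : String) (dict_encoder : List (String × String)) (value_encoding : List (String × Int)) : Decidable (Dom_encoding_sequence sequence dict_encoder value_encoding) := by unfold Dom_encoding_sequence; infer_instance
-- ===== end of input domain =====

-- B inverts the traversal: it indexes the sequence into a char→positions table, iterates the dict entries
-- writing resolved values into a position-indexed slot array, and compacts it (alternative decomposition; no speed claim).

-- ===== PORT A =====
-- literal port of A: loop over sequence.upper(), per character a double dict lookup; try/except pass = skip on either failed lookup
def encoding_sequence (sequence : String) (dict_encoder : List (String × String)) (value_encoding : List (String × Int)) : List Int :=
  (PySem.Str.upper sequence).toList.foldl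
    (fun array_response residue =>
      match (PySem.Dict.mk dict_encoder).get? (String.mk [residue]) with
      | none => array_response
      | some code =>
        match (PySem.Dict.mk value_encoding).get? code with
        | none => array_response
        | some value_encode => array_response ++ [value_encode])
    []

-- ===== PORT B =====
-- literal port of B: build positions (setdefault/append loop over enumerate), fill the slot array by
-- iterating dict_encoder's entries, then compact the non-None slots
def encoding_sequence_alt (sequence : String) (dict_encoder : List (String × String)) (value_encoding : List (String × Int)) : List Int :=
  let seq := (PySem.Str.upper sequence).toList
  let positions : PySem.Dict String (List Int) :=
    (PySem.List.enumerate seq).foldl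
      (fun d p => d.modify (String.mk [p.2]) [] (fun l => l ++ [p.1])) PySem.Dict.empty
  let slots0 : List (Option Int) := seq.map (fun _ => none)
  let slots := dict_encoder.foldl
    (fun slots p =>
      match positions.get? p.1, (PySem.Dict.mk value_encoding).get? p.2 with
      | some idxs, some value => idxs.foldl (fun s i => PySem.List.pySetD s i (some value)) slots
      | _, _ => slots)
    slots0
  slots.filterMap id

-- ===== PRECONDITION & SPEC =====
-- Pre_ excludes association lists with duplicate dict_encoder keys, which no Python dict can represent
-- (there A's first-match reading of the list and B's last-write-wins slot filling may disagree); it excludes no Python-representable input.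
def Pre_encoding_sequence (sequence : String) (dict_encoder : List (String × String)) (value_encoding : List (String × Int)) : Prop :=
  (dict_encoder.map Prod.fst).Nodup
instance (sequence : String) (dict_encoder : List (String × String)) (value_encoding : List (String × Int)) : Decidable (Pre_encoding_sequence sequence dict_encoder value_encoding) := by unfold Pre_encoding_sequence; infer_instance
def pvWitness_encoding_sequence : String × (List (String × String)) × (List (String × Int)) :=
  ("abZ", [("A", "x"), ("B", "y")], [("x", 1), ("y", 2)])
def Spec_encoding_sequence (sequence : String) (dict_encoder : List (String × String)) (value_encoding : List (String × Int)) (out : List Int) : Prop := out = encoding_sequence_alt sequence dict_encoder value_encoding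
instance (sequence : String) (dict_encoder : List (String × String)) (value_encoding : List (String × Int)) (out : List Int) : Decidable (Spec_encoding_sequence sequence dict_encoder value_encoding out) := by unfold Spec_encoding_sequence; infer_instance

-- ===== CLAIM (what is proved, stated in full; the proofs are below) =====
def Claim_equal_encoding_sequence : Prop := ∀ (sequence : String) (dict_encoder : List (String × String)) (value_encoding : List (String × Int)), Dom_encoding_sequence sequence dict_encoder value_encoding → Pre_encoding_sequence sequence dict_encoder value_encoding → Spec_encoding_sequence sequence dict_encoder value_encoding (encoding_sequence sequence dict_encoder value_encoding)

-- ===== LEMMAS AND PROOFS =====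

-- the composed per-character lookup both programs realise
def pvLookup (dict_encoder : List (String × String)) (value_encoding : List (String × Int)) (c : Char) : Option Int :=
  ((PySem.Dict.mk dict_encoder).get? (String.mk [c])).bind
    (fun code => (PySem.Dict.mk value_encoding).get? code)

-- B's positions table, named for the proofs (definitionally the port's let-bound term)
def pvPositions (seq : List Char) : PySem.Dict String (List Int) :=
  (PySem.List.enumerate seq).foldl
    (fun d p => d.modify (String.mk [p.2]) [] (fun l => l ++ [p.1])) PySem.Dict.empty

-- B's outer loop body, named for the proofs (definitionally the port's step function)
def pvStep (seq : List Char) (value_encoding : List (String × Int))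
    (slots : List (Option Int)) (p : String × String) : List (Option Int) :=
  match (pvPositions seq).get? p.1, (PySem.Dict.mk value_encoding).get? p.2 with
  | some idxs, some value => idxs.foldl (fun s i => PySem.List.pySetD s i (some value)) slots
  | _, _ => slots

-- a raw-list dict lookup at a key not among the keys is none
theorem pv_get?_mk_eq_none {ν : Type} (l : List (String × ν)) (s : String)
    (h : s ∉ l.map Prod.fst) : (PySem.Dict.mk l).get? s = none := by
  induction l with
  | nil => simp [PySem.Dict.get?]
  | cons p rest ih =>
    obtain ⟨k, v⟩ := p
    simp only [List.map_cons, List.mem_cons, not_or] at h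
    have hk : (k == s) = false := by
      simp only [beq_eq_false_iff_ne, ne_eq]
      exact fun he => h.1 he.symm
    rw [PySem.Dict.get?_mk_cons, hk, if_neg (by simp)]
    exact ih h.2

-- folding "append the hit, skip the miss" over A's nested match is a filterMap of the composed lookup
theorem pv_foldl_filterMap (de : List (String × String)) (ve : List (String × Int))
    (l : List Char) (acc : List Int) :
    l.foldl (fun array_response residue =>
      match (PySem.Dict.mk de).get? (String.mk [residue]) with
      | none => array_response
      | some code =>
        match (PySem.Dict.mk ve).get? code with
        | none => array_response
        | some value_encode => array_response ++ [value_encode]) acc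
    = acc ++ l.filterMap (pvLookup de ve) := by
  induction l generalizing acc with
  | nil => simp
  | cons x xs ih =>
    rw [List.foldl_cons, List.filterMap_cons]
    cases hx : (PySem.Dict.mk de).get? (String.mk [x]) with
    | none => simpa [hx, pvLookup] using ih acc
    | some code =>
      cases hv : (PySem.Dict.mk ve).get? code with
      | none => simpa [hx, hv, pvLookup] using ih acc
      | some v => simp [hx, hv, pvLookup, ih, List.append_assoc]

-- membership in enumerate
theorem pv_mem_enumerate {α : Type} (l : List α) (s : Int) (p : Int × α) :
    p ∈ PySem.List.enumerate l s ↔ ∃ j : Nat, ∃ h : j < l.length, p = (s + j, l[j]) := by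
  induction l generalizing s with
  | nil => simp [PySem.List.enumerate_nil]
  | cons x xs ih =>
    rw [PySem.List.enumerate_cons, List.mem_cons, ih]
    constructor
    · rintro (rfl | ⟨j, hj, rfl⟩)
      · exact ⟨0, by simp, by simp⟩
      · exact ⟨j + 1, by simpa using hj, by simp; omega⟩
    · rintro ⟨j, hj, rfl⟩
      cases j with
      | zero => left; simp
      | succ j =>
        right
        refine ⟨j, by simpa using hj, ?_⟩
        simp
        omega

-- positions.getD r [] is the list of indices of the characters whose singleton string is r
theorem pv_pos_getD (seq : List Char) (r : String) :
    (pvPositions seq).getD r []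
      = ((PySem.List.enumerate seq).filter (fun p => String.mk [p.2] == r)).map (fun p => p.1) := by
  unfold pvPositions
  rw [← List.foldl_map (f := fun p : Int × Char => (String.mk [p.2], p.1))
      (g := fun (d : PySem.Dict String (List Int)) q => d.modify q.1 [] (fun l => l ++ [q.2]))]
  rw [PySem.Dict.getD_foldl_modify_append]
  rw [List.filter_map, List.map_map]
  simp [PySem.Dict.getD_empty, Function.comp_def]

theorem pv_mem_pos (seq : List Char) (r : String) (i : Int) :
    i ∈ (pvPositions seq).getD r []
      ↔ ∃ j : Nat, ∃ h : j < seq.length, i = (j : Int) ∧ String.mk [seq[j]] = r := by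
  rw [pv_pos_getD, List.mem_map]
  constructor
  · rintro ⟨p, hp, rfl⟩
    rw [List.mem_filter] at hp
    obtain ⟨hmem, hkey⟩ := hp
    obtain ⟨j, hj, rfl⟩ := (pv_mem_enumerate seq 0 p).mp hmem
    exact ⟨j, hj, by simp, by simpa using hkey⟩
  · rintro ⟨j, hj, rfl, hr⟩
    refine ⟨((j : Int), seq[j]), ?_, rfl⟩
    rw [List.mem_filter]
    exact ⟨(pv_mem_enumerate seq 0 _).mpr ⟨j, hj, by simp⟩, by simpa using hr⟩

-- the inner write loop: pointwise effect on the slot array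
theorem pv_inner_get (idxs : List Int) (hnn : ∀ i ∈ idxs, 0 ≤ i) (v : Option Int)
    (slots : List (Option Int)) (j : Nat) :
    (idxs.foldl (fun s i => PySem.List.pySetD s i v) slots)[j]?
      = if (j : Int) ∈ idxs ∧ j < slots.length then some v else slots[j]? := by
  induction idxs generalizing slots with
  | nil => simp
  | cons i rest ih =>
    have hi : 0 ≤ i := hnn i (by simp)
    rw [List.foldl_cons, PySem.List.pySetD_of_nonneg _ _ hi,
      ih (fun x hx => hnn x (by simp [hx]))]
    rw [List.length_set, List.getElem?_set]
    by_cases hmem : (j : Int) ∈ rest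
    · by_cases hlt : j < slots.length
      · simp [hmem, hlt]
      · simp [hmem, hlt]
        intro h
        omega
    · by_cases hij : i.toNat = j
      · have hji : (j : Int) = i := by omega
        by_cases hlt : j < slots.length
        · simp [hij, hlt, hji]
        · simp [hij, hlt, hji]
      · have hji : ¬ ((j : Int) = i) := by omega
        simp [hmem, hij, hji]

theorem pv_inner_len (idxs : List Int) (v : Option Int) (slots : List (Option Int)) :
    (idxs.foldl (fun s i => PySem.List.pySetD s i v) slots).length = slots.length := by
  induction idxs generalizing slots with
  | nil => rfl
  | cons i rest ih => rw [List.foldl_cons, ih, PySem.List.length_pySetD]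

theorem pv_step_len (seq : List Char) (ve : List (String × Int))
    (slots : List (Option Int)) (p : String × String) :
    (pvStep seq ve slots p).length = slots.length := by
  unfold pvStep
  cases (pvPositions seq).get? p.1 with
  | none => rfl
  | some idxs =>
    cases (PySem.Dict.mk ve).get? p.2 with
    | none => rfl
    | some v => exact pv_inner_len idxs (some v) slots

theorem pv_outer_len (seq : List Char) (ve : List (String × Int))
    (de : List (String × String)) (slots : List (Option Int)) :
    (de.foldl (pvStep seq ve) slots).length = slots.length := by
  induction de generalizing slots with
  | nil => rfl
  | cons p rest ih => rw [List.foldl_cons, ih, pv_step_len]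

-- the outer loop computes, at every position, the composed lookup of the character there
theorem pv_outer_get (seq : List Char) (ve : List (String × Int))
    (de : List (String × String)) (hn : (de.map Prod.fst).Nodup)
    (slots : List (Option Int)) (hlen : slots.length = seq.length)
    (j : Nat) (hj : j < seq.length) :
    (de.foldl (pvStep seq ve) slots)[j]?
      = match pvLookup de ve seq[j] with
        | some v => some (some v)
        | none => slots[j]? := by
  induction de generalizing slots with
  | nil => simp [pvLookup, PySem.Dict.get?]
  | cons p rest ih =>
    obtain ⟨r, c⟩ := p
    simp only [List.map_cons, List.nodup_cons] at hn
    rw [List.foldl_cons]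
    have hlen' : (pvStep seq ve slots (r, c)).length = seq.length := by
      rw [pv_step_len]; exact hlen
    rw [ih hn.2 _ hlen']
    by_cases hr : r = String.mk [seq[j]]
    · -- this entry is the (unique) one keyed by seq[j]
      have hrest : (PySem.Dict.mk rest).get? (String.mk [seq[j]]) = none := by
        apply pv_get?_mk_eq_none; rw [← hr]; exact hn.1
      have hlookup_rest : pvLookup rest ve seq[j] = none := by
        simp [pvLookup, hrest]
      have hmemj : (j : Int) ∈ (pvPositions seq).getD r [] :=
        (pv_mem_pos seq r (j : Int)).mpr ⟨j, hj, rfl, hr.symm⟩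
      have hpos : (pvPositions seq).get? r = some ((pvPositions seq).getD r []) := by
        cases hp : (pvPositions seq).get? r with
        | none =>
          exfalso
          rw [PySem.Dict.getD_eq_get?_getD, hp] at hmemj
          simp at hmemj
        | some idxs => rw [PySem.Dict.getD_eq_get?_getD, hp]; rfl
      have hhead : (PySem.Dict.mk ((r, c) :: rest)).get? (String.mk [seq[j]]) = some c := by
        rw [PySem.Dict.get?_mk_cons, if_pos (by simp [hr])]
      cases hv : (PySem.Dict.mk ve).get? c with
      | some v =>
        have hstep : pvStep seq ve slots (r, c)
            = ((pvPositions seq).getD r []).foldl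
                (fun s i => PySem.List.pySetD s i (some v)) slots := by
          unfold pvStep; rw [hpos, hv]
        rw [hlookup_rest, hstep,
          pv_inner_get _ (fun i hi => by
            obtain ⟨k, _, rfl, _⟩ := (pv_mem_pos seq r i).mp hi
            positivity) (some v) slots j]
        rw [if_pos ⟨hmemj, by omega⟩]
        simp [pvLookup, hhead, hv]
      | none =>
        have hstep : pvStep seq ve slots (r, c) = slots := by
          unfold pvStep; rw [hpos, hv]
        rw [hlookup_rest, hstep]
        simp [pvLookup, hhead, hv]
    · -- this entry is keyed by some other residue: it cannot touch index j
      have hkey : (r == String.mk [seq[j]]) = false := by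
        simp [hr]
      have hlookup : pvLookup ((r, c) :: rest) ve seq[j] = pvLookup rest ve seq[j] := by
        simp [pvLookup, PySem.Dict.get?_mk_cons, hkey]
      have hstep : (pvStep seq ve slots (r, c))[j]? = slots[j]? := by
        unfold pvStep
        cases hp : (pvPositions seq).get? r with
        | none => rfl
        | some idxs =>
          cases hv : (PySem.Dict.mk ve).get? c with
          | none => rfl
          | some v =>
            have hidxs : idxs = (pvPositions seq).getD r [] := by
              rw [PySem.Dict.getD_eq_get?_getD, hp]; rfl
            rw [pv_inner_get _ (fun i hi => by
              rw [hidxs] at hi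
              obtain ⟨k, _, rfl, _⟩ := (pv_mem_pos seq r i).mp hi
              positivity) (some v) slots j]
            rw [if_neg]
            rintro ⟨hmem, -⟩
            rw [hidxs] at hmem
            obtain ⟨k, _, hk, hrk⟩ := (pv_mem_pos seq r (j : Int)).mp hmem
            have : k = j := by omega
            subst this
            exact hr hrk.symm
      rw [hlookup, hstep]

-- B's slot array, fully filled, is the map of the composed lookup over the sequence
theorem pv_slots_eq_map (seq : List Char) (de : List (String × String))
    (ve : List (String × Int)) (hn : (de.map Prod.fst).Nodup) :
    de.foldl (pvStep seq ve) (seq.map (fun _ => (none : Option Int)))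
      = seq.map (pvLookup de ve) := by
  apply List.ext_getElem?
  intro j
  by_cases hj : j < seq.length
  · rw [pv_outer_get seq ve de hn _ (by simp) j hj]
    rw [List.getElem?_map, List.getElem?_map, List.getElem?_eq_getElem hj]
    cases h : pvLookup de ve seq[j] <;> simp [h]
  · rw [List.getElem?_eq_none (by rw [pv_outer_len]; simp; omega),
      List.getElem?_eq_none (by simp; omega)]

-- ===== VERDICT (by name: the statement is the Claim_ definition above) =====
theorem encoding_sequence_spec : Claim_equal_encoding_sequence := by
  intro sequence dict_encoder value_encoding _ hpre
  unfold Spec_encoding_sequence encoding_sequence encoding_sequence_alt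
  rw [pv_foldl_filterMap, List.nil_append]
  show _ = (dict_encoder.foldl (pvStep (PySem.Str.upper sequence).toList value_encoding)
      ((PySem.Str.upper sequence).toList.map (fun _ => (none : Option Int)))).filterMap id
  rw [pv_slots_eq_map _ _ _ hpre, List.filterMap_map]
  rfl
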